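-- pv_equiv track=rewrite | github.com/Theo911/AEA_Sorting_Networks | batcher_odd_even_mergesort/batcher_odd_even_mergesort.py | odd_even_merge_sort
-- ===== SOURCE A (Python) =====
-- from typing import List, Tuple
--
-- def odd_even_merge(lo: int, hi: int, r: int) -> List[Tuple[int, int]]:
--     """
--     Generate comparators for the odd-even merge operation.
--
--     Args:
--         lo: lower bound of range
--         hi: upper bound of range
--         r: step size
--
--     Returns:
--         List of (i,j) comparator pairs
--     """
--     comparators = []
--
--     # Base case: only one element
--     if hi - lo <= 1:
--         return []
--
--     # Recursive case
--     m = (lo + hi) // 2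
--
--     # Recursively merge two halves
--     comparators.extend(odd_even_merge(lo, m, r))
--     comparators.extend(odd_even_merge(m, hi, r))
--
--     # Create odd-even merge pattern
--     comparators.extend(odd_even_merge_compare(lo, hi, r))
--
--     return comparators
--
-- def odd_even_merge_compare(lo: int, hi: int, r: int) -> List[Tuple[int, int]]:
--     """
--     Generate comparators for comparing elements within an odd-even merge.
--
--     Args:
--         lo: lower bound of range
--         hi: upper bound of range
--         r: step size
--
--     Returns:
--         List of (i,j) comparator pairs
--     """
--     comparators = []
--
--     # Compare elements that are 'r' distance apart
--     d = r * 2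
--     if d < hi - lo:
--         for i in range(lo + r, hi - r, d):
--             comparators.append((i, i + r))
--
--     return comparators
--
-- def odd_even_merge_sort(lo: int, hi: int) -> List[Tuple[int, int]]:
--     """
--     Generate comparators for the odd-even merge sort.
--
--     Args:
--         lo: lower bound of range (inclusive)
--         hi: upper bound of range (exclusive)
--
--     Returns:
--         List of (i,j) comparator pairs that form a sorting network
--     """
--     comparators = []
--
--     # Base case: only one element
--     if hi - lo <= 1:
--         return []
--
--     # Recursive case: split into two halves, sort them, then merge
--     m = (lo + hi) // 2
--
--     # Sort first half and second half recursively
--     comparators.extend(odd_even_merge_sort(lo, m))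
--     comparators.extend(odd_even_merge_sort(m, hi))
--
--     # Merge the two sorted halves
--     comparators.extend(odd_even_merge(lo, hi, 1))
--
--     return comparators
-- ===== SOURCE B (Python) =====
-- def odd_even_merge_sort(lo, hi):
--     # Iterative agenda machine: an explicit LIFO work stack of tagged ranges
--     # replaces both nested recursions; comparators are emitted in the same
--     # post-order the recursive version produces.
--     out = []
--     stack = [('S', lo, hi)]
--     while stack:
--         kind, a, b = stack.pop()
--         if kind == 'S':
--             if b - a > 1:
--                 m = (a + b) // 2
--                 stack.append(('M', a, b))
--                 stack.append(('S', m, b))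
--                 stack.append(('S', a, m))
--         elif kind == 'M':
--             if b - a > 1:
--                 m = (a + b) // 2
--                 stack.append(('C', a, b))
--                 stack.append(('M', m, b))
--                 stack.append(('M', a, m))
--         else:  # 'C': the compare step of the merge (r = 1, d = 2)
--             if b - a > 2:
--                 for i in range(a + 1, b - 1, 2):
--                     out.append((i, i + 1))
--     return out
-- ===== Notes on version B (the rewrite author's own statement) =====
-- stated objective: alternative
-- what changed: Both nested recursions (sort and merge) are replaced by a single iterative agenda machine: an explicit LIFO work stack of tagged ranges ('sort', 'merge', 'compare') whose pop order reproduces the recursive post-order emission exactly.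
import Mathlib
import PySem

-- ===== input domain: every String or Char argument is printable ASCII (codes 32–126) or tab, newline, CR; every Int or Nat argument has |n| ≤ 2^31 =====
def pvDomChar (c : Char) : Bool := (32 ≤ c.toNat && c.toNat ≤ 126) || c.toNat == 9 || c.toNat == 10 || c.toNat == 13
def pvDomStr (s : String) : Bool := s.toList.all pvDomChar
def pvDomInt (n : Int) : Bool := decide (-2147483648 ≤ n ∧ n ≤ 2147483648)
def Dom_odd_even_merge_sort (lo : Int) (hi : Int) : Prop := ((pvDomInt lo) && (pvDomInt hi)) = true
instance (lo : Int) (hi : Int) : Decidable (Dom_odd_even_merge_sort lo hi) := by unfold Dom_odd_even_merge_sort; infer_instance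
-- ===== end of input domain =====

-- B changes the decomposition only: both nested recursions are replaced by one iterative
-- agenda (explicit LIFO work stack of tagged ranges); same output, same order, same cost.
-- (Fuel arguments below are totality guards only; each is proved never to run out.)

-- ===== PORT A =====
def odd_even_merge_compare (lo : Int) (hi : Int) (r : Int) : List (Int × Int) :=
  let d := r * 2
  if d < hi - lo then
    List.foldl (fun acc i => acc ++ [(i, i + r)]) [] (PySem.List.pyRange (lo + r) (hi - r) d)
  else []

-- recursion depth bounded by (hi-lo).toNat: each half is strictly shorter
def oddEvenMergeFuel : Nat → Int → Int → Int → List (Int × Int)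
  | 0, _, _, _ => []
  | f + 1, lo, hi, r =>
    if hi - lo ≤ 1 then []
    else
      let m := PySem.Int.floordiv (lo + hi) 2
      oddEvenMergeFuel f lo m r ++ oddEvenMergeFuel f m hi r ++ odd_even_merge_compare lo hi r

def odd_even_merge (lo : Int) (hi : Int) (r : Int) : List (Int × Int) :=
  oddEvenMergeFuel (hi - lo).toNat lo hi r

def oddEvenMergeSortFuel : Nat → Int → Int → List (Int × Int)
  | 0, _, _ => []
  | f + 1, lo, hi =>
    if hi - lo ≤ 1 then []
    else
      let m := PySem.Int.floordiv (lo + hi) 2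
      oddEvenMergeSortFuel f lo m ++ oddEvenMergeSortFuel f m hi ++ odd_even_merge lo hi 1

def odd_even_merge_sort (lo : Int) (hi : Int) : List (Int × Int) :=
  oddEvenMergeSortFuel (hi - lo).toNat lo hi

-- ===== PORT B =====
-- agenda frame: 'S' = sort range, 'M' = merge range, 'C' = compare step of a merge
inductive PvFrame
  | S : Int → Int → PvFrame
  | M : Int → Int → PvFrame
  | C : Int → Int → PvFrame
deriving DecidableEq, Repr

-- fuel bound for one frame (totality guard; proved to strictly decrease per pop)
def pvWeight : PvFrame → Nat
  | .S a b => 2 * ((b - a).toNat) ^ 3 + 1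
  | .M a b => 2 * ((b - a).toNat) ^ 2 + 1
  | .C _ _ => 1

def pvRunFuel : Nat → List PvFrame → List (Int × Int) → List (Int × Int)
  | 0, _, out => out
  | _ + 1, [], out => out
  | f + 1, .S a b :: rest, out =>
      if b - a > 1 then
        let m := PySem.Int.floordiv (a + b) 2
        pvRunFuel f (.S a m :: .S m b :: .M a b :: rest) out
      else pvRunFuel f rest out
  | f + 1, .M a b :: rest, out =>
      if b - a > 1 then
        let m := PySem.Int.floordiv (a + b) 2
        pvRunFuel f (.M a m :: .M m b :: .C a b :: rest) out
      else pvRunFuel f rest out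
  | f + 1, .C a b :: rest, out =>
      if b - a > 2 then
        pvRunFuel f rest (List.foldl (fun acc i => acc ++ [(i, i + 1)]) out
          (PySem.List.pyRange (a + 1) (b - 1) 2))
      else pvRunFuel f rest out

def odd_even_merge_sort_alt (lo : Int) (hi : Int) : List (Int × Int) :=
  pvRunFuel (pvWeight (.S lo hi)) [.S lo hi] []

-- ===== PRECONDITION & SPEC =====
def Spec_odd_even_merge_sort (lo : Int) (hi : Int) (out : List (Int × Int)) : Prop := out = odd_even_merge_sort_alt lo hi
instance (lo : Int) (hi : Int) (out : List (Int × Int)) : Decidable (Spec_odd_even_merge_sort lo hi out) := by unfold Spec_odd_even_merge_sort; infer_instance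

-- ===== CLAIM (what is proved, stated in full; the proofs are below) =====
def Claim_equal_odd_even_merge_sort : Prop := ∀ (lo : Int) (hi : Int), Dom_odd_even_merge_sort lo hi → Spec_odd_even_merge_sort lo hi (odd_even_merge_sort lo hi)

-- ===== LEMMAS AND PROOFS =====

theorem mergeFuel_base (f : Nat) (lo hi r : Int) (h : hi - lo ≤ 1) :
    oddEvenMergeFuel f lo hi r = [] := by
  cases f with
  | zero => rfl
  | succ f => rw [oddEvenMergeFuel, if_pos h]

theorem sortFuel_base (f : Nat) (lo hi : Int) (h : hi - lo ≤ 1) :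
    oddEvenMergeSortFuel f lo hi = [] := by
  cases f with
  | zero => rfl
  | succ f => rw [oddEvenMergeSortFuel, if_pos h]

theorem mergeFuel_eq (f : Nat) : ∀ lo hi r : Int, (hi - lo).toNat ≤ f →
    oddEvenMergeFuel f lo hi r = odd_even_merge lo hi r := by
  induction f using Nat.strong_induction_on with
  | _ f ih =>
    intro lo hi r hf
    unfold odd_even_merge
    by_cases h1 : hi - lo ≤ 1
    · rw [mergeFuel_base _ _ _ _ h1, mergeFuel_base _ _ _ _ h1]
    · have hm : PySem.Int.floordiv (lo + hi) 2 = (lo + hi) / 2 :=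
        PySem.Int.floordiv_eq_ediv_of_pos (by omega)
      obtain ⟨f', rfl⟩ : ∃ f', f = f' + 1 := ⟨f - 1, by omega⟩
      obtain ⟨k, hk⟩ : ∃ k, (hi - lo).toNat = k + 1 := ⟨(hi - lo).toNat - 1, by omega⟩
      rw [hk, oddEvenMergeFuel, oddEvenMergeFuel, if_neg h1, if_neg h1]
      simp only [hm]
      have hlo : ((lo + hi) / 2 - lo).toNat ≤ f' := by omega
      have hhi : (hi - (lo + hi) / 2).toNat ≤ f' := by omega
      have hlo' : ((lo + hi) / 2 - lo).toNat ≤ k := by omega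
      have hhi' : (hi - (lo + hi) / 2).toNat ≤ k := by omega
      rw [ih f' (by omega) _ _ _ hlo, ih f' (by omega) _ _ _ hhi,
          ih k (by omega) _ _ _ hlo', ih k (by omega) _ _ _ hhi']

theorem sortFuel_eq (f : Nat) : ∀ lo hi : Int, (hi - lo).toNat ≤ f →
    oddEvenMergeSortFuel f lo hi = odd_even_merge_sort lo hi := by
  induction f using Nat.strong_induction_on with
  | _ f ih =>
    intro lo hi hf
    unfold odd_even_merge_sort
    by_cases h1 : hi - lo ≤ 1
    · rw [sortFuel_base _ _ _ h1, sortFuel_base _ _ _ h1]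
    · have hm : PySem.Int.floordiv (lo + hi) 2 = (lo + hi) / 2 :=
        PySem.Int.floordiv_eq_ediv_of_pos (by omega)
      obtain ⟨f', rfl⟩ : ∃ f', f = f' + 1 := ⟨f - 1, by omega⟩
      obtain ⟨k, hk⟩ : ∃ k, (hi - lo).toNat = k + 1 := ⟨(hi - lo).toNat - 1, by omega⟩
      rw [hk, oddEvenMergeSortFuel, oddEvenMergeSortFuel, if_neg h1, if_neg h1]
      simp only [hm]
      have hlo : ((lo + hi) / 2 - lo).toNat ≤ f' := by omega
      have hhi : (hi - (lo + hi) / 2).toNat ≤ f' := by omega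
      have hlo' : ((lo + hi) / 2 - lo).toNat ≤ k := by omega
      have hhi' : (hi - (lo + hi) / 2).toNat ≤ k := by omega
      rw [ih f' (by omega) _ _ hlo, ih f' (by omega) _ _ hhi,
          ih k (by omega) _ _ hlo', ih k (by omega) _ _ hhi']

-- one-step unfolding of A's ports
theorem merge_eq (lo hi r : Int) :
    odd_even_merge lo hi r =
      if hi - lo ≤ 1 then []
      else
        let m := PySem.Int.floordiv (lo + hi) 2
        odd_even_merge lo m r ++ odd_even_merge m hi r ++ odd_even_merge_compare lo hi r := by
  by_cases h1 : hi - lo ≤ 1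
  · rw [if_pos h1]; exact mergeFuel_base _ _ _ _ h1
  · rw [if_neg h1]
    have hm : PySem.Int.floordiv (lo + hi) 2 = (lo + hi) / 2 :=
      PySem.Int.floordiv_eq_ediv_of_pos (by omega)
    unfold odd_even_merge
    obtain ⟨k, hk⟩ : ∃ k, (hi - lo).toNat = k + 1 := ⟨(hi - lo).toNat - 1, by omega⟩
    rw [hk, oddEvenMergeFuel, if_neg h1]
    simp only [hm]
    rw [mergeFuel_eq k _ _ _ (by omega), mergeFuel_eq k _ _ _ (by omega)]
    simp [odd_even_merge]

theorem sort_eq (lo hi : Int) :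
    odd_even_merge_sort lo hi =
      if hi - lo ≤ 1 then []
      else
        let m := PySem.Int.floordiv (lo + hi) 2
        odd_even_merge_sort lo m ++ odd_even_merge_sort m hi ++ odd_even_merge lo hi 1 := by
  by_cases h1 : hi - lo ≤ 1
  · rw [if_pos h1]; exact sortFuel_base _ _ _ h1
  · rw [if_neg h1]
    have hm : PySem.Int.floordiv (lo + hi) 2 = (lo + hi) / 2 :=
      PySem.Int.floordiv_eq_ediv_of_pos (by omega)
    unfold odd_even_merge_sort
    obtain ⟨k, hk⟩ : ∃ k, (hi - lo).toNat = k + 1 := ⟨(hi - lo).toNat - 1, by omega⟩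
    rw [hk, oddEvenMergeSortFuel, if_neg h1]
    simp only [hm]
    rw [sortFuel_eq k _ _ (by omega), sortFuel_eq k _ _ (by omega)]
    simp [odd_even_merge_sort]

-- what one agenda frame contributes to the output, in A's vocabulary
def pvEmit : PvFrame → List (Int × Int)
  | .S a b => odd_even_merge_sort a b
  | .M a b => odd_even_merge a b 1
  | .C a b => odd_even_merge_compare a b 1

theorem pvRunFuel_spec (f : Nat) : ∀ (stack : List PvFrame) (out : List (Int × Int)),
    (stack.map pvWeight).sum ≤ f → pvRunFuel f stack out = out ++ (stack.map pvEmit).flatten := by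
  induction f using Nat.strong_induction_on with
  | _ f ih =>
    intro stack out hf
    match f, stack with
    | f, [] => cases f <;> simp [pvRunFuel]
    | 0, fr :: rest =>
        exfalso
        have : 1 ≤ pvWeight fr := by cases fr <;> simp [pvWeight]
        simp [List.map_cons, List.sum_cons] at hf; omega
    | f + 1, .S a b :: rest =>
        simp only [List.map_cons, List.sum_cons, pvWeight] at hf
        rw [pvRunFuel]
        by_cases h : b - a > 1
        · rw [if_pos h]
          have hm : PySem.Int.floordiv (a + b) 2 = (a + b) / 2 :=
            PySem.Int.floordiv_eq_ediv_of_pos (by omega)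
          have hb : ((PvFrame.S a ((a+b)/2) :: PvFrame.S ((a+b)/2) b :: PvFrame.M a b :: rest).map pvWeight).sum ≤ f := by
            simp only [List.map_cons, List.sum_cons, pvWeight]
            have h1 : (((a+b)/2) - a).toNat + (b - ((a+b)/2)).toNat = (b - a).toNat := by omega
            have h1a : 1 ≤ (((a+b)/2) - a).toNat := by omega
            have h1b : 1 ≤ (b - ((a+b)/2)).toNat := by omega
            set x := (((a+b)/2) - a).toNat
            set y := (b - ((a+b)/2)).toNat
            have hxy : x + y ≤ x * y + 1 := by nlinarith
            rw [← h1] at hf; nlinarith [hxy]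
          rw [hm, ih f (by omega) _ _ hb]
          have hs : odd_even_merge_sort a b =
              odd_even_merge_sort a ((a+b)/2) ++ odd_even_merge_sort ((a+b)/2) b ++ odd_even_merge a b 1 := by
            rw [sort_eq, if_neg (show ¬ b - a ≤ 1 by omega)]; simp only [hm]
          simp [pvEmit, hs]
        · rw [if_neg h, ih f (by omega) _ _ (by omega)]
          have hs : odd_even_merge_sort a b = [] := sortFuel_base _ _ _ (by omega)
          simp [pvEmit, hs]
    | f + 1, .M a b :: rest =>
        simp only [List.map_cons, List.sum_cons, pvWeight] at hf
        rw [pvRunFuel]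
        by_cases h : b - a > 1
        · rw [if_pos h]
          have hm : PySem.Int.floordiv (a + b) 2 = (a + b) / 2 :=
            PySem.Int.floordiv_eq_ediv_of_pos (by omega)
          have hb : ((PvFrame.M a ((a+b)/2) :: PvFrame.M ((a+b)/2) b :: PvFrame.C a b :: rest).map pvWeight).sum ≤ f := by
            simp only [List.map_cons, List.sum_cons, pvWeight]
            have h1 : (((a+b)/2) - a).toNat + (b - ((a+b)/2)).toNat = (b - a).toNat := by omega
            have h1a : 1 ≤ (((a+b)/2) - a).toNat := by omega
            have h1b : 1 ≤ (b - ((a+b)/2)).toNat := by omega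
            set x := (((a+b)/2) - a).toNat
            set y := (b - ((a+b)/2)).toNat
            have hxy : 1 ≤ x * y := Nat.one_le_iff_ne_zero.mpr (by positivity)
            rw [← h1] at hf; nlinarith [hxy]
          rw [hm, ih f (by omega) _ _ hb]
          have hs : odd_even_merge a b 1 =
              odd_even_merge a ((a+b)/2) 1 ++ odd_even_merge ((a+b)/2) b 1 ++ odd_even_merge_compare a b 1 := by
            rw [merge_eq, if_neg (show ¬ b - a ≤ 1 by omega)]; simp only [hm]
          simp [pvEmit, hs]
        · rw [if_neg h, ih f (by omega) _ _ (by omega)]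
          have hs : odd_even_merge a b 1 = [] := mergeFuel_base _ _ _ _ (by omega)
          simp [pvEmit, hs]
    | f + 1, .C a b :: rest =>
        simp only [List.map_cons, List.sum_cons, pvWeight] at hf
        rw [pvRunFuel]
        by_cases h : b - a > 2
        · rw [if_pos h, ih f (by omega) _ _ (by omega)]
          have hc : odd_even_merge_compare a b 1 =
              (PySem.List.pyRange (a + 1) (b - 1) 2).map (fun i => (i, i + 1)) := by
            simp only [odd_even_merge_compare]
            rw [show ((1 : Int) * 2) = 2 from by norm_num, if_pos (show (2 : Int) < b - a by omega),
              PySem.List.foldl_append_singleton_eq_map]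
            simp
          rw [PySem.List.foldl_append_singleton_eq_map]
          simp [pvEmit, hc]
        · rw [if_neg h, ih f (by omega) _ _ (by omega)]
          have hc : odd_even_merge_compare a b 1 = [] := by
            simp only [odd_even_merge_compare]
            rw [show ((1 : Int) * 2) = 2 from by norm_num, if_neg (show ¬ (2 : Int) < b - a by omega)]
          simp [pvEmit, hc]

-- ===== VERDICT (by name: the statement is the Claim_ definition above) =====
theorem odd_even_merge_sort_spec : Claim_equal_odd_even_merge_sort := by
  intro lo hi _
  unfold Spec_odd_even_merge_sort odd_even_merge_sort_alt
  rw [pvRunFuel_spec _ _ _ (by simp [pvWeight])]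
  simp [pvEmit]
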